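-- pv_equiv track=rewrite | github.com/Krishnapatil28113/PICT_Coursework | subnetting.py | ip_address_generation
-- ===== SOURCE A (Python) =====
-- def ip_address_generation(starting_ip_octets , n):
--     c0 = starting_ip_octets[3]
--     c1 = starting_ip_octets[2]
--     c2 = starting_ip_octets[1]
--     c3 = starting_ip_octets[0]
--
--     i=0
--     addresses = []
--
--     for c3 in range(starting_ip_octets[0] , 256):
--         for c2 in range(starting_ip_octets[1] , 256):
--             for c1 in range(starting_ip_octets[2] , 256):
--                 for c0 in range(starting_ip_octets[3] , 256):
--                     if i>=n:
--                         break
--                     addresses.append((c3 , c2 , c1 , c0))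
--                     i += 1
--
--     return addresses
-- ===== SOURCE B (Python) =====
-- def ip_address_generation(starting_ip_octets, n):
--     L0 = max(0, 256 - starting_ip_octets[0])
--     L1 = max(0, 256 - starting_ip_octets[1])
--     L2 = max(0, 256 - starting_ip_octets[2])
--     L3 = max(0, 256 - starting_ip_octets[3])
--     count = min(max(n, 0), L0 * L1 * L2 * L3)
--     addresses = [None] * count
--     for i in range(count):
--         j = i
--         d0 = j % L3; j //= L3
--         d1 = j % L2; j //= L2
--         d2 = j % L1; j //= L1
--         d3 = j % L0
--         addresses[i] = (starting_ip_octets[0] + d3,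
--                         starting_ip_octets[1] + d2,
--                         starting_ip_octets[2] + d1,
--                         starting_ip_octets[3] + d0)
--     return addresses
-- ===== Notes on version B (the rewrite author's own statement) =====
-- stated objective: alternative
-- what changed: A enumerates four nested range(octet,256) loops with a quota counter and an inner break; B computes count = min(n, L0*L1*L2*L3) and produces each tuple directly by mixed-radix decoding of its output index into a preallocated list, with no nested enumeration.
import Mathlib
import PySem

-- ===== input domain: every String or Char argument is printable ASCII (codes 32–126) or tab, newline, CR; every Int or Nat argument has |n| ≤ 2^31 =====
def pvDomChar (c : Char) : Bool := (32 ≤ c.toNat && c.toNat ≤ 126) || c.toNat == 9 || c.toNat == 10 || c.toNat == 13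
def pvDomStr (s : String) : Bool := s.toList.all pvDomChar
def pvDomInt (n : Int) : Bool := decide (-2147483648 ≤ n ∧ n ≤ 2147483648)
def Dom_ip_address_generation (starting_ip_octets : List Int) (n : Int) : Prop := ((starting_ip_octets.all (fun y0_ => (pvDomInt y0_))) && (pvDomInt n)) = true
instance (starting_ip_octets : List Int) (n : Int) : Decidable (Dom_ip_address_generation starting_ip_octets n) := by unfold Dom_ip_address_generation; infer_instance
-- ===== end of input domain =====

-- B replaces A's four nested range loops (which keep spinning emptily after the quota) by
-- direct mixed-radix decoding of each output index: count = min(n, L0*L1*L2*L3) tuples are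
-- produced by index arithmetic alone, with no nested enumeration. Objective: alternative.

-- ===== PORT A =====
-- the innermost 'for c0 in range(...)' with its 'if i >= n: break'
def pvInner (n c3 c2 c1 : Int) : List Int → Int × List (List Int) → Int × List (List Int)
  | [], st => st
  | c0 :: rest, (i, acc) =>
    if n ≤ i then (i, acc)
    else pvInner n c3 c2 c1 rest (i + 1, acc ++ [[c3, c2, c1, c0]])

def ip_address_generation (starting_ip_octets : List Int) (n : Int) : List (List Int) :=
  -- initial c0..c3 assignments of A are dead (shadowed by the loop variables); the
  -- indexing they perform is what Pre_ (length ≥ 4) guarantees succeeds.  Outside Pre_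
  -- Python raises IndexError and the port's value is irrelevant; the default 256 keeps
  -- the evaluation of the port instant there (empty ranges).
  let s0 := (PySem.List.pyGet? starting_ip_octets 0).getD 256
  let s1 := (PySem.List.pyGet? starting_ip_octets 1).getD 256
  let s2 := (PySem.List.pyGet? starting_ip_octets 2).getD 256
  let s3 := (PySem.List.pyGet? starting_ip_octets 3).getD 256
  ((PySem.List.pyRange s0 256 1).foldl (fun st c3 =>
    (PySem.List.pyRange s1 256 1).foldl (fun st c2 =>
      (PySem.List.pyRange s2 256 1).foldl (fun st c1 =>
        pvInner n c3 c2 c1 (PySem.List.pyRange s3 256 1) st) st) st)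
    ((0 : Int), ([] : List (List Int)))).2

-- ===== PORT B =====
def ip_address_generation_alt (starting_ip_octets : List Int) (n : Int) : List (List Int) :=
  let s0 := (PySem.List.pyGet? starting_ip_octets 0).getD 256
  let s1 := (PySem.List.pyGet? starting_ip_octets 1).getD 256
  let s2 := (PySem.List.pyGet? starting_ip_octets 2).getD 256
  let s3 := (PySem.List.pyGet? starting_ip_octets 3).getD 256
  let L0 := max 0 (256 - s0)
  let L1 := max 0 (256 - s1)
  let L2 := max 0 (256 - s2)
  let L3 := max 0 (256 - s3)
  let count := min (max n 0) (L0 * L1 * L2 * L3)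
  (PySem.List.pyRange 0 count 1).map (fun i =>
    let d0 := PySem.Int.mod i L3
    let i := PySem.Int.floordiv i L3
    let d1 := PySem.Int.mod i L2
    let i := PySem.Int.floordiv i L2
    let d2 := PySem.Int.mod i L1
    let i := PySem.Int.floordiv i L1
    let d3 := PySem.Int.mod i L0
    [s0 + d3, s1 + d2, s2 + d1, s3 + d0])

-- ===== PRECONDITION & SPEC =====
-- A indexes starting_ip_octets[0..3]; on shorter lists it raises IndexError.
def Pre_ip_address_generation (starting_ip_octets : List Int) (n : Int) : Prop :=
  4 ≤ starting_ip_octets.length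
instance (starting_ip_octets : List Int) (n : Int) : Decidable (Pre_ip_address_generation starting_ip_octets n) := by unfold Pre_ip_address_generation; infer_instance

def pvWitness_ip_address_generation : List Int × Int := ([254, 255, 254, 253], 7)

def Spec_ip_address_generation (starting_ip_octets : List Int) (n : Int) (out : List (List Int)) : Prop := out = ip_address_generation_alt starting_ip_octets n
instance (starting_ip_octets : List Int) (n : Int) (out : List (List Int)) : Decidable (Spec_ip_address_generation starting_ip_octets n out) := by unfold Spec_ip_address_generation; infer_instance

-- ===== CLAIM (what is proved, stated in full; the proofs are below) =====
def Claim_equal_ip_address_generation : Prop := ∀ (starting_ip_octets : List Int) (n : Int), Dom_ip_address_generation starting_ip_octets n → Pre_ip_address_generation starting_ip_octets n → Spec_ip_address_generation starting_ip_octets n (ip_address_generation starting_ip_octets n)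

-- ===== LEMMAS AND PROOFS =====

-- inner loop = "take what remains of the quota"
theorem pvInner_eq (n c3 c2 c1 : Int) (xs : List Int) (st : Int × List (List Int)) :
    pvInner n c3 c2 c1 xs st =
      (st.1 + (((xs.take (n - st.1).toNat).map (fun c0 => [c3, c2, c1, c0])).length : Int),
       st.2 ++ (xs.take (n - st.1).toNat).map (fun c0 => [c3, c2, c1, c0])) := by
  induction xs generalizing st with
  | nil => simp [pvInner]
  | cons x rest ih =>
    obtain ⟨i, acc⟩ := st
    by_cases h : n ≤ i
    · have : (n - i).toNat = 0 := by omega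
      simp [pvInner, h, this]
    · have h1 : (n - i).toNat = (n - (i + 1)).toNat + 1 := by omega
      simp only [pvInner, if_neg h, ih]
      rw [h1]
      simp only [List.take_succ_cons, List.map_cons, List.length_cons, Prod.mk.injEq]
      refine ⟨?_, ?_⟩
      · push_cast; ring
      · simp


-- one "for v in range(...)" layer over a body with take-semantics = take over the flatMap
theorem pvFoldTake (g : Int → List (List Int)) (n : Int) (xs : List Int) :
    ∀ (st : Int × List (List Int)),
      xs.foldl (fun st x => (st.1 + (((g x).take (n - st.1).toNat).length : Int),
                             st.2 ++ (g x).take (n - st.1).toNat)) st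
      = (st.1 + (((xs.flatMap g).take (n - st.1).toNat).length : Int),
         st.2 ++ (xs.flatMap g).take (n - st.1).toNat) := by
  induction xs with
  | nil => intro st; simp
  | cons x rest ih =>
    intro st
    obtain ⟨i, acc⟩ := st
    simp only [List.foldl_cons, ih]
    have hK : (n - (i + (((g x).take (n - i).toNat).length : Int))).toNat
        = (n - i).toNat - (g x).length := by
      have h2 : ((g x).take (n - i).toNat).length = min ((n - i).toNat) (g x).length :=
        List.length_take
      omega
    rw [hK]
    simp only [List.flatMap_cons]
    rw [List.take_append]
    simp only [Prod.mk.injEq]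
    refine ⟨?_, ?_⟩
    · simp only [List.length_append]
      push_cast; ring
    · simp [List.append_assoc]


-- length of a flatMap whose chunks all have the same length
theorem pvLenFlatMap {α β : Type} (g : α → List β) (B : Nat) (xs : List α)
    (h : ∀ x ∈ xs, (g x).length = B) :
    (xs.flatMap g).length = xs.length * B := by
  induction xs with
  | nil => simp
  | cons x rest ih =>
    simp only [List.flatMap_cons, List.length_append, List.length_cons]
    rw [h x (by simp), ih (fun y hy => h y (by simp [hy]))]
    ring


-- indexing into a flatMap whose chunks all have the same length
theorem pvGetFlatMap {α β : Type} (g : α → List β) (B : Nat) (xs : List α)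
    (h : ∀ x ∈ xs, (g x).length = B) (i : Nat) :
    (xs.flatMap g)[i]? = xs[i / B]?.bind (fun x => (g x)[i % B]?) := by
  induction xs generalizing i with
  | nil => simp
  | cons x rest ih =>
    have hx : (g x).length = B := h x (by simp)
    by_cases hB : B = 0
    · subst hB
      have hgx : g x = [] := List.eq_nil_of_length_eq_zero hx
      have hnil : (x :: rest).flatMap g = [] := by
        rw [List.flatMap_eq_nil_iff]
        intro y hy
        exact List.eq_nil_of_length_eq_zero (h y hy)
      simp [hnil, hgx, Nat.div_zero, Nat.mod_zero]
    · by_cases hi : i < B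
      · have hdiv : i / B = 0 := Nat.div_eq_of_lt hi
        have hmod : i % B = i := Nat.mod_eq_of_lt hi
        simp [List.flatMap_cons, List.getElem?_append, hx, hi, hdiv, hmod]
      · have hge : B ≤ i := Nat.le_of_not_lt hi
        have hdiv : i / B = (i - B) / B + 1 := by
          rw [← Nat.add_div_right _ (Nat.pos_of_ne_zero hB), Nat.sub_add_cancel hge]
        have hmod : i % B = (i - B) % B := by
          rw [← Nat.add_mod_right (i - B) B, Nat.sub_add_cancel hge]
        simp only [List.flatMap_cons, List.getElem?_append, hx, if_neg hi, hdiv, hmod,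
          List.getElem?_cons_succ]
        exact ih (fun y hy => h y (by simp [hy])) (i - B)


-- layer 1: the fold over c1
theorem pvLvl1 (s3 n c3 c2 : Int) (xs : List Int) (st : Int × List (List Int)) :
    xs.foldl (fun st c1 => pvInner n c3 c2 c1 (PySem.List.pyRange s3 256 1) st) st =
      (st.1 + (((xs.flatMap (fun c1 => (PySem.List.pyRange s3 256 1).map
                  (fun c0 => [c3, c2, c1, c0]))).take (n - st.1).toNat).length : Int),
       st.2 ++ (xs.flatMap (fun c1 => (PySem.List.pyRange s3 256 1).map
                  (fun c0 => [c3, c2, c1, c0]))).take (n - st.1).toNat) := by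
  simp only [pvInner_eq, List.map_take]
  exact pvFoldTake _ n xs st

-- layer 2: the fold over c2
theorem pvLvl2 (s2 s3 n c3 : Int) (xs : List Int) (st : Int × List (List Int)) :
    xs.foldl (fun st c2 => (PySem.List.pyRange s2 256 1).foldl
        (fun st c1 => pvInner n c3 c2 c1 (PySem.List.pyRange s3 256 1) st) st) st =
      (st.1 + (((xs.flatMap (fun c2 => (PySem.List.pyRange s2 256 1).flatMap
                  (fun c1 => (PySem.List.pyRange s3 256 1).map
                    (fun c0 => [c3, c2, c1, c0])))).take (n - st.1).toNat).length : Int),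
       st.2 ++ (xs.flatMap (fun c2 => (PySem.List.pyRange s2 256 1).flatMap
                  (fun c1 => (PySem.List.pyRange s3 256 1).map
                    (fun c0 => [c3, c2, c1, c0])))).take (n - st.1).toNat) := by
  simp only [pvLvl1]
  exact pvFoldTake _ n xs st

-- layer 3: the fold over c3
theorem pvLvl3 (s1 s2 s3 n : Int) (xs : List Int) (st : Int × List (List Int)) :
    xs.foldl (fun st c3 => (PySem.List.pyRange s1 256 1).foldl
        (fun st c2 => (PySem.List.pyRange s2 256 1).foldl
          (fun st c1 => pvInner n c3 c2 c1 (PySem.List.pyRange s3 256 1) st) st) st) st =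
      (st.1 + (((xs.flatMap (fun c3 => (PySem.List.pyRange s1 256 1).flatMap
                  (fun c2 => (PySem.List.pyRange s2 256 1).flatMap
                    (fun c1 => (PySem.List.pyRange s3 256 1).map
                      (fun c0 => [c3, c2, c1, c0]))))).take (n - st.1).toNat).length : Int),
       st.2 ++ (xs.flatMap (fun c3 => (PySem.List.pyRange s1 256 1).flatMap
                  (fun c2 => (PySem.List.pyRange s2 256 1).flatMap
                    (fun c1 => (PySem.List.pyRange s3 256 1).map
                      (fun c0 => [c3, c2, c1, c0]))))).take (n - st.1).toNat) := by
  simp only [pvLvl2]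
  exact pvFoldTake _ n xs st

theorem pvMain (s0 s1 s2 s3 n : Int) :
    ((PySem.List.pyRange s0 256 1).foldl (fun st c3 =>
      (PySem.List.pyRange s1 256 1).foldl (fun st c2 =>
        (PySem.List.pyRange s2 256 1).foldl (fun st c1 =>
          pvInner n c3 c2 c1 (PySem.List.pyRange s3 256 1) st) st) st)
      ((0 : Int), ([] : List (List Int)))).2
    =
    (let L0 := max 0 (256 - s0)
     let L1 := max 0 (256 - s1)
     let L2 := max 0 (256 - s2)
     let L3 := max 0 (256 - s3)
     let count := min (max n 0) (L0 * L1 * L2 * L3)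
     (PySem.List.pyRange 0 count 1).map (fun i =>
       let d0 := PySem.Int.mod i L3
       let i := PySem.Int.floordiv i L3
       let d1 := PySem.Int.mod i L2
       let i := PySem.Int.floordiv i L2
       let d2 := PySem.Int.mod i L1
       let i := PySem.Int.floordiv i L1
       let d3 := PySem.Int.mod i L0
       [s0 + d3, s1 + d2, s2 + d1, s3 + d0])) := by
  rw [pvLvl3]
  simp only [Int.sub_zero, List.nil_append]
  have h0 : max 0 (256 - s0) = (((256 - s0).toNat : Nat) : Int) := by omega
  have h1 : max 0 (256 - s1) = (((256 - s1).toNat : Nat) : Int) := by omega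
  have h2 : max 0 (256 - s2) = (((256 - s2).toNat : Nat) : Int) := by omega
  have h3 : max 0 (256 - s3) = (((256 - s3).toNat : Nat) : Int) := by omega
  rw [h0, h1, h2, h3]
  set l0 := (256 - s0).toNat with hl0
  set l1 := (256 - s1).toNat with hl1
  set l2 := (256 - s2).toNat with hl2
  set l3 := (256 - s3).toNat with hl3
  have hM : min (max n 0) ((l0 : Int) * l1 * l2 * l3)
      = ((min n.toNat (l0 * (l1 * (l2 * l3))) : Nat) : Int) := by
    have hp : ((l0 * (l1 * (l2 * l3)) : Nat) : Int) = (l0 : Int) * l1 * l2 * l3 := by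
      push_cast; ring
    rw [← hp]; omega
  rw [hM]
  set M := min n.toNat (l0 * (l1 * (l2 * l3))) with hMdef
  -- chunk lengths
  have hC1 : ∀ c3 c2 c1 : Int,
      ((PySem.List.pyRange s3 256 1).map (fun c0 => [c3, c2, c1, c0])).length = l3 := by
    intro c3 c2 c1; simp [PySem.List.length_pyRange_one, hl3]
  have hC2 : ∀ c3 c2 : Int,
      ((PySem.List.pyRange s2 256 1).flatMap (fun c1 =>
        (PySem.List.pyRange s3 256 1).map (fun c0 => [c3, c2, c1, c0]))).length = l2 * l3 := by
    intro c3 c2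
    rw [pvLenFlatMap _ l3 _ (fun x _ => hC1 c3 c2 x), PySem.List.length_pyRange_one]
  have hC3 : ∀ c3 : Int,
      ((PySem.List.pyRange s1 256 1).flatMap (fun c2 =>
        (PySem.List.pyRange s2 256 1).flatMap (fun c1 =>
          (PySem.List.pyRange s3 256 1).map (fun c0 => [c3, c2, c1, c0])))).length
        = l1 * (l2 * l3) := by
    intro c3
    rw [pvLenFlatMap _ (l2 * l3) _ (fun x _ => hC2 c3 x), PySem.List.length_pyRange_one]
  have hC4 :
      ((PySem.List.pyRange s0 256 1).flatMap (fun c3 =>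
        (PySem.List.pyRange s1 256 1).flatMap (fun c2 =>
          (PySem.List.pyRange s2 256 1).flatMap (fun c1 =>
            (PySem.List.pyRange s3 256 1).map (fun c0 => [c3, c2, c1, c0]))))).length
        = l0 * (l1 * (l2 * l3)) := by
    rw [pvLenFlatMap _ (l1 * (l2 * l3)) _ (fun x _ => hC3 x), PySem.List.length_pyRange_one]
  apply List.ext_getElem?
  intro k
  by_cases hk : k < M
  · have hkP : k < l0 * (l1 * (l2 * l3)) := by omega
    have hkn : k < n.toNat := by omega
    have hB1 : l1 * (l2 * l3) ≠ 0 := by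
      intro h; rw [h, Nat.mul_zero] at hkP; omega
    have hl3p : 0 < l3 := by
      rcases Nat.eq_zero_or_pos l3 with h | h
      · exfalso; apply hB1; rw [h]; ring
      · exact h
    have hl2p : 0 < l2 := by
      rcases Nat.eq_zero_or_pos l2 with h | h
      · exfalso; apply hB1; rw [h]; ring
      · exact h
    have hl1p : 0 < l1 := by
      rcases Nat.eq_zero_or_pos l1 with h | h
      · exfalso; apply hB1; rw [h]; ring
      · exact h
    have hB1p : 0 < l1 * (l2 * l3) := Nat.pos_of_ne_zero hB1
    have hB2p : 0 < l2 * l3 := Nat.mul_pos hl2p hl3p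
    -- LHS
    rw [List.getElem?_take, if_pos hkn,
        pvGetFlatMap _ (l1 * (l2 * l3)) _ (fun x _ => hC3 x),
        PySem.List.getElem?_pyRange_one, if_pos (by
          rw [Nat.div_lt_iff_lt_mul hB1p]; omega)]
    simp only [Option.bind_some]
    rw [pvGetFlatMap _ (l2 * l3) _ (fun x _ => hC2 _ x),
        PySem.List.getElem?_pyRange_one, if_pos (by
          rw [Nat.div_lt_iff_lt_mul hB2p]
          calc k % (l1 * (l2 * l3)) < l1 * (l2 * l3) := Nat.mod_lt _ hB1p
          _ = l1 * (l2 * l3) := rfl)]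
    simp only [Option.bind_some]
    rw [pvGetFlatMap _ l3 _ (fun x _ => hC1 _ _ x),
        PySem.List.getElem?_pyRange_one, if_pos (by
          rw [Nat.div_lt_iff_lt_mul hl3p]
          exact Nat.mod_lt _ hB2p)]
    simp only [Option.bind_some]
    rw [List.getElem?_map, PySem.List.getElem?_pyRange_one, if_pos (Nat.mod_lt _ hl3p)]
    simp only [Option.map_some]
    -- RHS
    rw [PySem.List.getElem?_map_pyRange_zero _ M k hk]
    simp only [PySem.Int.mod_natCast, PySem.Int.floordiv_natCast]
    -- now both sides are `some [ ... ]` with Nat div/mod chains; close by Nat identities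
    have e0 : k % (l1 * (l2 * l3)) % (l2 * l3) % l3 = k % l3 := by
      rw [Nat.mod_mod_of_dvd _ (dvd_mul_left (l2 * l3) l1)]
      exact Nat.mod_mod_of_dvd _ (dvd_mul_left l3 l2)
    have e1 : k % (l1 * (l2 * l3)) % (l2 * l3) / l3 = k / l3 % l2 := by
      rw [Nat.mod_mod_of_dvd _ (dvd_mul_left (l2 * l3) l1), mul_comm l2 l3]
      exact Nat.mod_mul_right_div_self k l3 l2
    have e2 : k % (l1 * (l2 * l3)) / (l2 * l3) = k / l3 / l2 % l1 := by
      rw [mul_comm l1 (l2 * l3), Nat.mod_mul_right_div_self k (l2 * l3) l1,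
          Nat.div_div_eq_div_mul, mul_comm l3 l2]
    have e3 : k / (l1 * (l2 * l3)) = k / l3 / l2 / l1 % l0 := by
      have hd : k / l3 / l2 / l1 = k / (l1 * (l2 * l3)) := by
        rw [Nat.div_div_eq_div_mul, Nat.div_div_eq_div_mul]
        congr 1; ring
      rw [hd, Nat.mod_eq_of_lt (by rw [Nat.div_lt_iff_lt_mul hB1p]; omega)]
    rw [e0, e1, e2, e3]
  · -- out of range on both sides
    rw [List.getElem?_eq_none, List.getElem?_eq_none]
    · rw [List.length_map, PySem.List.length_pyRange_one]
      omega
    · rw [List.length_take, hC4]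
      omega

-- ===== VERDICT (by name: the statement is the Claim_ definition above) =====
theorem ip_address_generation_spec : Claim_equal_ip_address_generation := by
  intro s n _ _
  unfold Spec_ip_address_generation ip_address_generation ip_address_generation_alt
  exact pvMain _ _ _ _ n
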